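-- pv_equiv track=rewrite | github.com/pypi-data/pypi-mirror-189 | packages/md-harmonize/md_harmonize-1.0.4-py3-none-any.whl/md_harmonize-1.0.4.data/platlib/md_harmonize/KEGG_parser.py | get_center_list
-- ===== SOURCE A (Python) =====
-- def get_center_list(center_atom_index: list) -> list:
--     """
--     Generate all the combinations of reaction centers.
--
--     :param center_atom_index: list of atom index list for each reaction centers. eg: three reaction centers: [[0, 1, 2], [5, 6], [10, 11]].
--     :return: the list of combined reaction centers. eg: [[0, 5, 10], [0, 5, 11], [0, 6, 10], [0, 6, 11], [1, 5, 10], [1, 5, 11], [1, 6, 10], [1, 6, 11], [2, 5, 10], [2, 5, 11], [2, 6, 10], [2, 6, 11]]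
--     """
--     combines = []
--
--     def dfs(i: int, seen: list) -> None:
--         """
--         Use the depth first search algorithm to generate all the combinations of reaction centers.
--
--         :param i: the current atom index.
--         :param seen: the list of already seen atom index.
--         :return: None
--         """
--         if i == len(center_atom_index):
--             combines.append(list(seen))
--             return
--         for idx in center_atom_index[i]:
--             if idx not in seen:
--                 seen.append(idx)
--                 dfs(i+1, seen)
--                 seen.pop()
--     dfs(0, [])
--     return combines
-- ===== SOURCE B (Python) =====
-- def get_center_list(center_atom_index: list) -> list:
--     """Breadth-wise Cartesian product, then keep tuples with all-distinct entries."""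
--     prods = [[]]
--     for group in center_atom_index:
--         prods = [p + [idx] for p in prods for idx in group]
--     return [c for c in prods if len(set(c)) == len(c)]
-- ===== Notes on version B (the rewrite author's own statement) =====
-- stated objective: alternative
-- what changed: Replaces the recursive DFS with an explicit mutable 'seen' list and pruning by an iterative breadth-wise Cartesian-product build followed by a single all-distinct filter (len(set(c)) == len(c)).
import Mathlib
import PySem

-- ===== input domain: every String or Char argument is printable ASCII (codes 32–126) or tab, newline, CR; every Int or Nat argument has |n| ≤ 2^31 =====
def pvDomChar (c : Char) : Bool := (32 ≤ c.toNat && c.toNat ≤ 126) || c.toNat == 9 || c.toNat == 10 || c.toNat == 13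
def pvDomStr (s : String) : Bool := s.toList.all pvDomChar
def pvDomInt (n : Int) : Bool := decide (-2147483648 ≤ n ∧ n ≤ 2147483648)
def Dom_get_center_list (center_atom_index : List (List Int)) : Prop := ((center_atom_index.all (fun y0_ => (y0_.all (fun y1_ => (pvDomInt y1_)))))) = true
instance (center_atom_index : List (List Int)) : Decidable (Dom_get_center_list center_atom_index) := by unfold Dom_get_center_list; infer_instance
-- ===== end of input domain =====

-- B replaces A's pruned recursive DFS by an iterative Cartesian-product build plus one
-- all-distinct filter (alternative decomposition, same asymptotic cost).

-- ===== PORT A =====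
-- A's inner dfs(i, seen): recursion over the suffix of center_atom_index starting at i;
-- 'seen.append(idx) … dfs(i+1, seen) … seen.pop()' becomes passing 'seen ++ [idx]'.
def pvDfsA : List (List Int) → List Int → List (List Int)
  | [], seen => [seen]
  | group :: rest, seen =>
      group.foldl (fun acc idx =>
        if idx ∈ seen then acc else acc ++ pvDfsA rest (seen ++ [idx])) []

def get_center_list (center_atom_index : List (List Int)) : List (List Int) :=
  pvDfsA center_atom_index []

-- ===== PORT B =====
def get_center_list_alt (center_atom_index : List (List Int)) : List (List Int) :=
  (center_atom_index.foldl
      (fun prods group => prods.flatMap (fun p => group.map (fun idx => p ++ [idx])))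
      [[]]).filter
    (fun c => (PySem.Set.ofList c).length == c.length)   -- len(set(c)) == len(c)

-- ===== PRECONDITION & SPEC =====
def Spec_get_center_list (center_atom_index : List (List Int)) (out : List (List Int)) : Prop := out = get_center_list_alt center_atom_index
instance (center_atom_index : List (List Int)) (out : List (List Int)) : Decidable (Spec_get_center_list center_atom_index out) := by unfold Spec_get_center_list; infer_instance

-- ===== CLAIM (what is proved, stated in full; the proofs are below) =====
def Claim_equal_get_center_list : Prop := ∀ (center_atom_index : List (List Int)), Dom_get_center_list center_atom_index → Spec_get_center_list center_atom_index (get_center_list center_atom_index)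

-- ===== LEMMAS AND PROOFS =====

-- right-nested Cartesian product: the common normal form of both programs
def pvProd : List (List Int) → List (List Int)
  | [] => [[]]
  | g :: rest => g.flatMap (fun i => (pvProd rest).map (i :: ·))

lemma pvFoldl_prod (l : List (List Int)) (acc : List (List Int)) :
    l.foldl (fun prods group => prods.flatMap (fun p => group.map (fun idx => p ++ [idx]))) acc
      = acc.flatMap (fun p => (pvProd l).map (p ++ ·)) := by
  induction l generalizing acc with
  | nil => simp [pvProd]
  | cons g rest ih =>
      simp only [List.foldl_cons, ih, pvProd, List.flatMap_assoc, List.flatMap_map,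
        List.map_flatMap, List.map_map]
      apply List.flatMap_congr; intro p _
      apply List.flatMap_congr; intro i _
      apply List.map_congr_left; intro c _
      simp

lemma pvSet_len_eq_iff (c : List Int) :
    ((PySem.Set.ofList c).length = c.length) ↔ c.Nodup := by
  induction c using List.reverseRecOn with
  | nil => simp [PySem.Set.ofList]
  | append_singleton xs x ih =>
      have hof : PySem.Set.ofList (xs ++ [x]) = PySem.Set.add (PySem.Set.ofList xs) x := by
        simp [PySem.Set.ofList]
      by_cases hx : x ∈ xs
      · have hadd : PySem.Set.add (PySem.Set.ofList xs) x = PySem.Set.ofList xs := by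
          simp [PySem.Set.add, PySem.Set.mem_ofList, hx]
        have hle := PySem.Set.length_ofList_le (xs := xs)
        rw [hof, hadd]
        simp only [List.length_append, List.length_cons, List.length_nil]
        rw [show (xs ++ [x]).Nodup ↔ x ∉ xs ∧ xs.Nodup from by
          rw [← List.concat_eq_append, List.nodup_concat]]
        constructor
        · intro h; exact absurd h (by omega)
        · rintro ⟨hxm, -⟩; exact absurd hx hxm
      · have hadd : PySem.Set.add (PySem.Set.ofList xs) x = PySem.Set.ofList xs ++ [x] := by
          simp [PySem.Set.add, PySem.Set.mem_ofList, hx]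
        rw [hof, hadd]
        simp only [List.length_append, List.length_cons, List.length_nil]
        rw [show (xs ++ [x]).Nodup ↔ x ∉ xs ∧ xs.Nodup from by
          rw [← List.concat_eq_append, List.nodup_concat]]
        constructor
        · intro h; exact ⟨hx, ih.mp (by omega)⟩
        · rintro ⟨-, hnd⟩; have := ih.mpr hnd; omega

lemma pvDfsA_eq (xs : List (List Int)) (seen : List Int) :
    pvDfsA xs seen
      = ((pvProd xs).filter (fun c => decide (c.Nodup ∧ ∀ x ∈ c, x ∉ seen))).map (seen ++ ·) := by
  induction xs generalizing seen with
  | nil => simp [pvDfsA, pvProd]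
  | cons g rest ih =>
      have hstep : pvDfsA (g :: rest) seen
          = g.flatMap (fun i => if i ∈ seen then [] else pvDfsA rest (seen ++ [i])) := by
        show g.foldl (fun acc idx =>
            if idx ∈ seen then acc else acc ++ pvDfsA rest (seen ++ [idx])) [] = _
        have h : ∀ (g' : List Int) (acc : List (List Int)),
            g'.foldl (fun acc idx =>
              if idx ∈ seen then acc else acc ++ pvDfsA rest (seen ++ [idx])) acc
            = acc ++ g'.flatMap (fun i => if i ∈ seen then [] else pvDfsA rest (seen ++ [i])) := by
          intro g'; induction g' with
          | nil => intro acc; simp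
          | cons i tl ih' =>
              intro acc
              by_cases h : i ∈ seen <;>
                simp [h, ih', List.append_assoc]
        simpa using h g []
      rw [hstep, pvProd]
      rw [List.filter_flatMap, List.map_flatMap]
      apply List.flatMap_congr
      intro i _
      rw [List.filter_map, List.map_map]
      by_cases hi : i ∈ seen
      · rw [List.filter_eq_nil_iff.mpr (by intro c hc; simp [hi])]
        simp [hi]
      · rw [if_neg hi, ih]
        congr 1
        · funext c; simp
        · apply List.filter_congr
          intro c _
          simp only [Function.comp, List.nodup_cons, List.mem_cons, decide_eq_decide]
          constructor
          · rintro ⟨hnd, hall⟩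
            have hic : i ∉ c := fun hm => by
              have := hall i hm
              exact this (List.mem_append.mpr (Or.inr (List.mem_singleton.mpr rfl)))
            refine ⟨⟨hic, hnd⟩, ?_⟩
            rintro x (rfl | hx)
            · exact hi
            · intro hs
              exact hall x hx (List.mem_append.mpr (Or.inl hs))
          · rintro ⟨⟨hic, hnd⟩, hall⟩
            refine ⟨hnd, ?_⟩
            intro x hx hmem
            rcases List.mem_append.mp hmem with h1 | h1
            · exact hall x (Or.inr hx) h1
            · exact hic (List.mem_singleton.mp h1 ▸ hx)

-- ===== VERDICT (by name: the statement is the Claim_ definition above) =====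
theorem get_center_list_spec : Claim_equal_get_center_list := by
  intro l _
  show get_center_list l = get_center_list_alt l
  rw [get_center_list, get_center_list_alt, pvDfsA_eq, pvFoldl_prod]
  simp only [List.flatMap_cons, List.flatMap_nil, List.append_nil, List.map_id', List.nil_append]
  apply List.filter_congr
  intro c _
  rw [Bool.eq_iff_iff]
  simp [pvSet_len_eq_iff]
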